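-- pv_equiv track=rewrite | github.com/maltelandgren/orate | bench/bbh/report.py | _summarise_trace
-- ===== SOURCE A (Python) =====
-- def _summarise_trace(trace: list) -> str:
--     """One-line summary of a trace: counts of premise/deduce/answer ok+rej."""
--     counts: dict[str, int] = {}
--     for t in trace:
--         if "name" not in t:
--             continue
--         key = f"{t['name']}{'-rej' if t.get('rejected') else ''}"
--         counts[key] = counts.get(key, 0) + 1
--     return ", ".join(f"{k}: {v}" for k, v in sorted(counts.items()))
-- ===== SOURCE B (Python) =====
-- def _summarise_trace(trace: list) -> str:
--     """One-line summary of a trace: counts of premise/deduce/answer ok+rej."""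
--     keys = sorted(
--         t["name"] + ("-rej" if t.get("rejected") else "")
--         for t in trace
--         if "name" in t
--     )
--     parts = []
--     i = 0
--     n = len(keys)
--     while i < n:
--         j = i
--         while j < n and keys[j] == keys[i]:
--             j += 1
--         parts.append(f"{keys[i]}: {j - i}")
--         i = j
--     return ", ".join(parts)
-- ===== Notes on version B (the rewrite author's own statement) =====
-- stated objective: alternative
-- what changed: Replaces the count-into-a-dict-then-sort-items pass by a sort-then-scan: build the key list in one comprehension, sort it, and count each run of equal keys in a single scan.
import Mathlib
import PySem

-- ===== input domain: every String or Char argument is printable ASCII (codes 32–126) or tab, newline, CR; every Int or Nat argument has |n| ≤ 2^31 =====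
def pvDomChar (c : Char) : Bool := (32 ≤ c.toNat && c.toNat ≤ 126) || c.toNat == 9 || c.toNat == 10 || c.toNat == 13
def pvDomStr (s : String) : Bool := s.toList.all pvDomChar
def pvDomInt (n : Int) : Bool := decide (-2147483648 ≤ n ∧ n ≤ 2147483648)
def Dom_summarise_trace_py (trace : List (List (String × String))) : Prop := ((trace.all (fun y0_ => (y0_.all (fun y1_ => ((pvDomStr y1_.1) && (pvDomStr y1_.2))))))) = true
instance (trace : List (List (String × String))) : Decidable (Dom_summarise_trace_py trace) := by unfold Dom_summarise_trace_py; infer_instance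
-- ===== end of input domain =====

-- B replaces A's count-into-a-dict-then-sort-items by sort-then-scan (build key list, sort it, count runs); same result, alternative decomposition.

-- ===== PORT A =====
-- counts: dict[str,int] built in a loop; then ", ".join over sorted(counts.items())
def summarise_trace_py (trace : List (List (String × String))) : String :=
  let counts : PySem.Dict String Int :=
    trace.foldl (fun counts t =>
      match (PySem.Dict.mk t).get? "name" with
      | none => counts  -- "name" not in t: continue
      | some nm =>
        let key := nm ++ (if (PySem.Dict.mk t).getD "rejected" "" = "" then "" else "-rej")
        counts.insert key (counts.getD key 0 + 1)) PySem.Dict.empty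
  PySem.Str.join ", "
    ((PySem.List.sorted2 counts.items (fun p => p.1) (fun p => p.2)).map
      (fun p => p.1 ++ ": " ++ PySem.Int.toStr p.2))

-- ===== PORT B =====
-- the key of one trace entry (none when "name" is absent)
def pvKeyB (t : List (String × String)) : Option String :=
  match (PySem.Dict.mk t).get? "name" with
  | none => none
  | some nm => some (nm ++ (if (PySem.Dict.mk t).getD "rejected" "" = "" then "" else "-rej"))

-- the while-loop scan over the sorted key list: one (key, run length) pair per run of equal keys
def pvGroupRuns : List String → List (String × Int)
  | [] => []
  | k :: rest =>
      (k, 1 + ((rest.takeWhile (fun x => x == k)).length : Int)) ::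
        pvGroupRuns (rest.dropWhile (fun x => x == k))
termination_by s => s.length
decreasing_by
  simp only [List.length_cons]
  exact Nat.lt_succ_of_le (List.length_dropWhile_le _ _)

def summarise_trace_py_alt (trace : List (List (String × String))) : String :=
  let keys := PySem.List.sorted (trace.filterMap pvKeyB) (fun x => x)
  PySem.Str.join ", "
    ((pvGroupRuns keys).map (fun p => p.1 ++ ": " ++ PySem.Int.toStr p.2))

-- ===== PRECONDITION & SPEC =====
def Spec_summarise_trace_py (trace : List (List (String × String))) (out : String) : Prop := out = summarise_trace_py_alt trace
instance (trace : List (List (String × String))) (out : String) : Decidable (Spec_summarise_trace_py trace out) := by unfold Spec_summarise_trace_py; infer_instance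

-- ===== CLAIM (what is proved, stated in full; the proofs are below) =====
def Claim_equal_summarise_trace_py : Prop := ∀ (trace : List (List (String × String))), Dom_summarise_trace_py trace → Spec_summarise_trace_py trace (summarise_trace_py trace)

-- ===== LEMMAS AND PROOFS =====

-- A's loop over the trace is the counting loop over the key list
lemma countsA_eq (trace : List (List (String × String))) :
    ∀ d : PySem.Dict String Int,
      trace.foldl (fun counts t =>
        match (PySem.Dict.mk t).get? "name" with
        | none => counts
        | some nm =>
          let key := nm ++ (if (PySem.Dict.mk t).getD "rejected" "" = "" then "" else "-rej")
          counts.insert key (counts.getD key 0 + 1)) d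
      = (trace.filterMap pvKeyB).foldl (fun d k => d.insert k (d.getD k 0 + 1)) d := by
  induction trace with
  | nil => intro d; rfl
  | cons t ts ih =>
    intro d
    cases h : (PySem.Dict.mk t).get? "name" with
    | none => simp [List.foldl_cons, pvKeyB, h, ih]
    | some nm => simp [List.foldl_cons, pvKeyB, h, ih]

-- insertBy with two agreeing predicates
lemma insertBy_congr {α : Type} (f g : α → α → Bool) (x : α) :
    ∀ ys : List α, (∀ b ∈ ys, f x b = g x b) →
      PySem.List.insertBy f x ys = PySem.List.insertBy g x ys := by
  intro ys
  induction ys with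
  | nil => intro _; rfl
  | cons y ys ih =>
    intro h
    simp only [PySem.List.insertBy]
    rw [h y (by simp)]
    by_cases hg : g x y = true
    · simp [hg]
    · simp [hg, ih (fun b hb => h b (by simp [hb]))]

lemma foldl_insertBy_congr {α : Type} (f g : α → α → Bool) :
    ∀ (l acc : List α),
      (∀ a ∈ l, ∀ b, (b ∈ acc ∨ b ∈ l) → f a b = g a b) →
      l.foldl (fun acc x => PySem.List.insertBy f x acc) acc
        = l.foldl (fun acc x => PySem.List.insertBy g x acc) acc := by
  intro l
  induction l with
  | nil => intro acc _; rfl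
  | cons x xs ih =>
    intro acc h
    simp only [List.foldl_cons]
    rw [insertBy_congr f g x acc (fun b hb => h x (by simp) b (Or.inl hb))]
    apply ih
    intro a ha b hb
    apply h a (by simp [ha])
    rcases hb with hb | hb
    · rcases (PySem.List.mem_insertBy _ _ _ _).mp hb with hb | hb
      · right; simp [hb]
      · left; exact hb
    · right; simp [hb]

-- when the first component determines the element, Python's tuple sort is the sort by first component
lemma sorted2_eq_sorted_fst (l : List (String × Int))
    (hdet : ∀ a ∈ l, ∀ b ∈ l, a.1 = b.1 → a = b) :
    PySem.List.sorted2 l (fun p => p.1) (fun p => p.2)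
      = PySem.List.sorted l (fun p => p.1) := by
  simp only [PySem.List.sorted2, PySem.List.sorted, Bool.false_eq_true, if_false]
  apply foldl_insertBy_congr
  intro a ha b hb
  have hb' : b ∈ l := hb.resolve_left (by simp)
  by_cases h1 : a.1 < b.1
  · simp [h1]
  · by_cases h2 : b.1 < a.1
    · simp [h1, h2]
    · have heq : a.1 = b.1 := le_antisymm (not_lt.mp h2) (not_lt.mp h1)
      have hab : a = b := hdet a ha b hb' heq
      subst hab
      simp

-- everything left after dropping the leading run of k is strictly above k
lemma drop_lt (k : String) :
    ∀ rest : List String, (∀ x ∈ rest, k ≤ x) → rest.Pairwise (· ≤ ·) →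
      ∀ x ∈ rest.dropWhile (fun y => y == k), k < x := by
  intro rest
  induction rest with
  | nil => simp
  | cons a as ih =>
    intro hle hp x hx
    rw [List.dropWhile_cons] at hx
    by_cases ha : (a == k) = true
    · rw [if_pos ha] at hx
      exact ih (fun y hy => hle y (by simp [hy])) (List.pairwise_cons.mp hp).2 x hx
    · rw [if_neg ha] at hx
      have hka : k < a :=
        lt_of_le_of_ne (hle a (by simp)) (fun h => ha (by simp [h.symm]))
      rcases List.mem_cons.mp hx with rfl | hx
      · exact hka
      · exact lt_of_lt_of_le hka ((List.pairwise_cons.mp hp).1 x hx)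

-- the run scan of a ≤-sorted list: strictly increasing keys, same membership, run length = count
lemma groupRuns_spec :
    ∀ s : List String, s.Pairwise (· ≤ ·) →
    ((pvGroupRuns s).map (·.1)).Pairwise (· < ·)
    ∧ (∀ k, k ∈ (pvGroupRuns s).map (·.1) ↔ k ∈ s)
    ∧ (∀ p ∈ pvGroupRuns s, p.2 = (s.count p.1 : Int)) := by
  intro s
  induction s using pvGroupRuns.induct with
  | case1 =>
    intro _
    refine ⟨by simp [pvGroupRuns], by simp [pvGroupRuns], by simp [pvGroupRuns]⟩
  | case2 k rest ih =>
    intro hp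
    obtain ⟨hk, hrest⟩ := List.pairwise_cons.mp hp
    have hdropP : (rest.dropWhile (fun x => x == k)).Pairwise (· ≤ ·) :=
      hrest.sublist (List.dropWhile_sublist _)
    have hlt := drop_lt k rest hk hrest
    obtain ⟨ih1, ih2, ih3⟩ := ih hdropP
    have hsplit : rest.takeWhile (fun x => x == k) ++ rest.dropWhile (fun x => x == k) = rest :=
      List.takeWhile_append_dropWhile
    have htake : ∀ x ∈ rest.takeWhile (fun x => x == k), x = k := by
      intro x hx
      have := List.mem_takeWhile_imp hx
      simpa using this
    have hne : ∀ x ∈ rest.dropWhile (fun x => x == k), x ≠ k :=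
      fun x hx => ne_of_gt (hlt x hx)
    refine ⟨?_, ?_, ?_⟩
    · simp only [pvGroupRuns, List.map_cons, List.pairwise_cons]
      refine ⟨?_, ih1⟩
      intro y hy
      rcases List.mem_map.mp hy with ⟨p, hp', rfl⟩
      exact hlt p.1 ((ih2 p.1).mp (List.mem_map.mpr ⟨p, hp', rfl⟩))
    · intro k'
      have hmem : k' ∈ rest ↔ k' ∈ rest.takeWhile (fun x => x == k) ∨ k' ∈ rest.dropWhile (fun x => x == k) := by
        conv_lhs => rw [← hsplit]
        exact List.mem_append
      simp only [pvGroupRuns, List.map_cons, List.mem_cons, ih2, hmem]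
      constructor
      · rintro (rfl | h)
        · exact Or.inl rfl
        · exact Or.inr (Or.inr h)
      · rintro (rfl | h | h)
        · exact Or.inl rfl
        · exact Or.inl (htake _ h)
        · exact Or.inr h
    · intro p hp'
      simp only [pvGroupRuns, List.mem_cons] at hp'
      rcases hp' with rfl | hp'
      · simp only
        have hcnt : (k :: rest).count k = rest.count k + 1 := List.count_cons_self
        have hr : rest.count k
            = (rest.takeWhile (fun x => x == k)).count k
              + (rest.dropWhile (fun x => x == k)).count k := by
          conv_lhs => rw [← hsplit]
          exact List.count_append
        have ht : (rest.takeWhile (fun x => x == k)).count k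
            = (rest.takeWhile (fun x => x == k)).length :=
          List.count_eq_length.mpr (fun b hb => (htake b hb).symm)
        have hd : (rest.dropWhile (fun x => x == k)).count k = 0 :=
          List.count_eq_zero.mpr (fun hmem => (hne k hmem) rfl)
        rw [hcnt, hr, ht, hd]
        push_cast
        ring
      · have h3 := ih3 p hp'
        have hpmem : p.1 ∈ rest.dropWhile (fun x => x == k) :=
          (ih2 p.1).mp (List.mem_map.mpr ⟨p, hp', rfl⟩)
        have hpne : p.1 ≠ k := hne p.1 hpmem
        have hkp : ¬ k = p.1 := fun h => hpne h.symm
        have hcnt : (k :: rest).count p.1 = rest.count p.1 := by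
          rw [List.count_cons]
          simp [hkp]
        have hr : rest.count p.1
            = (rest.takeWhile (fun x => x == k)).count p.1
              + (rest.dropWhile (fun x => x == k)).count p.1 := by
          conv_lhs => rw [← hsplit]
          exact List.count_append
        have ht : (rest.takeWhile (fun x => x == k)).count p.1 = 0 :=
          List.count_eq_zero.mpr (fun hmem => hpne (htake _ hmem))
        rw [h3, hcnt, hr, ht]
        simp

theorem summarise_main (trace : List (List (String × String))) :
    summarise_trace_py trace = summarise_trace_py_alt trace := by
  simp only [summarise_trace_py, summarise_trace_py_alt]
  rw [countsA_eq, PySem.Dict.foldl_insert_getD_add_one_eq_counter, PySem.Dict.items_counter]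
  congr 1
  congr 1
  -- notation
  set K := trace.filterMap pvKeyB with hK
  set S := PySem.List.sorted K (fun x => x) with hS
  have hsorted : S.Pairwise (· ≤ ·) := by
    have := PySem.List.sorted_pairwise K (fun x => x)
    simpa [← hS] using this
  obtain ⟨g1, g2, g3⟩ := groupRuns_spec S hsorted
  -- first-component key determines an item of the counter
  have hdet : ∀ a ∈ (PySem.Set.ofList K).map (fun k => (k, (List.count k K : Int))),
      ∀ b ∈ (PySem.Set.ofList K).map (fun k => (k, (List.count k K : Int))), a.1 = b.1 → a = b := by
    intro a ha b hb hab
    rcases List.mem_map.mp ha with ⟨ka, _, rfl⟩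
    rcases List.mem_map.mp hb with ⟨kb, _, rfl⟩
    simp only at hab
    subst hab
    rfl
  rw [sorted2_eq_sorted_fst _ hdet]
  -- B's run list is a rearrangement of the counter items, strictly increasing on keys
  have hpairfst : (pvGroupRuns S).Pairwise (fun a b => a.1 < b.1) := List.pairwise_map.mp g1
  have hnodup1 : ((pvGroupRuns S).map (·.1)).Nodup := g1.imp ne_of_lt
  have hself : pvGroupRuns S
      = ((pvGroupRuns S).map (·.1)).map (fun k => (k, (List.count k K : Int))) := by
    rw [List.map_map]
    have hid : ∀ p ∈ pvGroupRuns S, ((fun k => (k, (List.count k K : Int))) ∘ (·.1)) p = p := by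
      intro p hp
      have h3 := g3 p hp
      have hc : List.count p.1 S = List.count p.1 K :=
        (PySem.List.sorted_perm K (fun x => x) false).count_eq p.1
      cases p with
      | mk p1 p2 =>
        simp only [Function.comp] at *
        rw [← hc, ← h3]
    rw [List.map_congr_left hid]
    simp
  have hkeysperm : ((pvGroupRuns S).map (·.1)).Perm (PySem.Set.ofList K) := by
    rw [List.perm_ext_iff_of_nodup hnodup1 (PySem.Set.nodup_ofList K)]
    intro a
    rw [g2 a, hS, PySem.List.mem_sorted, PySem.Set.mem_ofList]
  have hperm : (pvGroupRuns S).Perm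
      ((PySem.Set.ofList K).map (fun k => (k, (List.count k K : Int)))) := by
    rw [hself]
    exact hkeysperm.map _
  exact PySem.List.sorted_eq_of_perm_of_pairwise_lt _ _ _ hperm hpairfst

-- ===== VERDICT (by name: the statement is the Claim_ definition above) =====
theorem summarise_trace_py_spec : Claim_equal_summarise_trace_py := by
  intro trace _
  unfold Spec_summarise_trace_py
  exact summarise_main trace
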